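-- pv_equiv track=rewrite | github.com/alihassan200721/python-journey | plates.py | check_number_placement
-- ===== SOURCE A (Python) =====
-- def check_number_placement(s):
--     number_start = None
--     for i, char in enumerate(s):
--         if char.isdigit():
--             number_start = i
--             break
--
--     if number_start is None:
--         return True
--
--     for i in range(number_start, len(s)):
--         if not s[i].isdigit():
--             return False
--
--     if s[number_start] == '0':
--         return False
--
--     return True
-- ===== SOURCE B (Python) =====
-- def check_number_placement(s):
--     seen_digit = False
--     for char in s:
--         if char.isdigit():
--             if not seen_digit and char == '0':
--                 return False
--             seen_digit = True
--         elif seen_digit: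
--             return False
--     return True
-- ===== Notes on version B (the rewrite author's own statement) =====
-- stated objective: simpler
-- what changed: Replaced A's two sequential scans (find the first digit, then verify the suffix is all digits and check for a leading zero) with a single state-machine traversal that carries one seen_digit flag and rejects on a zero that starts the digit block or on a non-digit after a digit.
import Mathlib
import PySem

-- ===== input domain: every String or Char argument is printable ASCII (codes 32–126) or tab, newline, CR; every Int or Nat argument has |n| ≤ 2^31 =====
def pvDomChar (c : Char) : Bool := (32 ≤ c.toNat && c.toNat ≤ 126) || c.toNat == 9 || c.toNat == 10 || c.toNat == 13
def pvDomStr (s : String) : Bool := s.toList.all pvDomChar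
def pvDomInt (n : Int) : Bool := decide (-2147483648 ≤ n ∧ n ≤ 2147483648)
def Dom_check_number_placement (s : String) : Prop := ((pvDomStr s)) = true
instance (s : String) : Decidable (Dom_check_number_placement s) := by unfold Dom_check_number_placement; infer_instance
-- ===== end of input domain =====

-- B replaces A's two sequential scans with a single state-machine pass carrying a seen_digit flag (objective: simpler).


-- ===== PORT A =====
-- first loop: 'for i, char in enumerate(s): if char.isdigit(): number_start = i; break'
def pvFindDigit : List Char → Nat → Option Nat
  | [], _ => none
  | c :: rest, i => if PySem.Chars.isdigit c then some i else pvFindDigit rest (i + 1)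

-- second loop: 'for i in range(number_start, len(s)): if not s[i].isdigit(): return False'
-- (returns false exactly when the Python loop returns False early)
def pvSuffixLoop (cs : List Char) : List Int → Bool
  | [] => true
  | i :: rest =>
    if !(PySem.Chars.isdigit (PySem.List.pyGetD cs i ' ')) then false
    else pvSuffixLoop cs rest

def check_number_placement (s : String) : Bool :=
  let cs := s.toList
  match pvFindDigit cs 0 with
  | none => true
  | some st =>
    if pvSuffixLoop cs (PySem.List.pyRange (st : Int) (cs.length : Int) 1) then
      if PySem.List.pyGetD cs (st : Int) ' ' == '0' then false else true
    else false

-- ===== PORT B =====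
def pvAltLoop : List Char → Bool → Bool
  | [], _ => true
  | c :: rest, seen =>
    if PySem.Chars.isdigit c then
      if !seen && c == '0' then false
      else pvAltLoop rest true
    else
      if seen then false else pvAltLoop rest seen

def check_number_placement_alt (s : String) : Bool :=
  pvAltLoop s.toList false

-- ===== PRECONDITION & SPEC =====
def Spec_check_number_placement (s : String) (out : Bool) : Prop := out = check_number_placement_alt s
instance (s : String) (out : Bool) : Decidable (Spec_check_number_placement s out) := by unfold Spec_check_number_placement; infer_instance

-- ===== CLAIM (what is proved, stated in full; the proofs are below) =====
def Claim_equal_check_number_placement : Prop := ∀ (s : String), Dom_check_number_placement s → Spec_check_number_placement s (check_number_placement s)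

-- ===== LEMMAS AND PROOFS =====

-- the early-exit suffix loop is an 'all' over its index list
theorem pvSuffixLoop_eq_all (cs : List Char) (l : List Int) :
    pvSuffixLoop cs l = l.all (fun i => PySem.Chars.isdigit (PySem.List.pyGetD cs i ' ')) := by
  induction l with
  | nil => rfl
  | cons i rest ih =>
    by_cases h : PySem.Chars.isdigit (PySem.List.pyGetD cs i ' ') <;>
      simp [pvSuffixLoop, h, ih]

theorem pvSuffixLoop_range (cs : List Char) (st : Nat) :
    pvSuffixLoop cs (PySem.List.pyRange (st : Int) (cs.length : Int) 1)
      = (cs.drop st).all PySem.Chars.isdigit := by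
  rw [pvSuffixLoop_eq_all,
      show ((PySem.List.pyRange (st : Int) (cs.length : Int) 1).all
              (fun i => PySem.Chars.isdigit (PySem.List.pyGetD cs i ' ')))
        = ((PySem.List.pyRange (st : Int) (cs.length : Int) 1).map
              (fun i => PySem.List.pyGetD cs i ' ')).all PySem.Chars.isdigit
      from by rw [List.all_map]; rfl,
      PySem.List.map_pyGetD_pyRange' cs ' ' (a := (st : Int)) (by positivity)]
  simp

theorem pvFindDigit_shift (cs : List Char) (i : Nat) :
    pvFindDigit cs i = (pvFindDigit cs 0).map (· + i) := by
  induction cs generalizing i with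
  | nil => rfl
  | cons c rest ih =>
    by_cases h : PySem.Chars.isdigit c
    · simp [pvFindDigit, h]
    · rw [show pvFindDigit (c :: rest) i = pvFindDigit rest (i + 1) from by
            simp [pvFindDigit, h],
          show pvFindDigit (c :: rest) 0 = pvFindDigit rest 1 from by
            simp [pvFindDigit, h],
          ih (i + 1), ih 1, Option.map_map]
      cases pvFindDigit rest 0 with
      | none => rfl
      | some a => simp; omega

theorem pvAltLoop_true (cs : List Char) :
    pvAltLoop cs true = cs.all PySem.Chars.isdigit := by
  induction cs with
  | nil => rfl
  | cons c rest ih =>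
    by_cases h : PySem.Chars.isdigit c <;> simp [pvAltLoop, h, ih]

theorem pvMain (cs : List Char) :
    (match pvFindDigit cs 0 with
     | none => true
     | some st =>
       if pvSuffixLoop cs (PySem.List.pyRange (st : Int) (cs.length : Int) 1) then
         if PySem.List.pyGetD cs (st : Int) ' ' == '0' then false else true
       else false)
    = pvAltLoop cs false := by
  induction cs with
  | nil => rfl
  | cons c rest ih =>
    by_cases h : PySem.Chars.isdigit c
    · -- first digit is at the head
      rw [show pvFindDigit (c :: rest) 0 = some 0 from by simp [pvFindDigit, h]]
      show (if pvSuffixLoop (c :: rest)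
              (PySem.List.pyRange ((0 : Nat) : Int) (((c :: rest).length : Nat) : Int) 1) then
              if PySem.List.pyGetD (c :: rest) ((0 : Nat) : Int) ' ' == '0' then false else true
            else false) = pvAltLoop (c :: rest) false
      rw [pvSuffixLoop_range (c :: rest) 0,
          show PySem.List.pyGetD (c :: rest) ((0 : Nat) : Int) ' ' = c from by simp]
      cases h0 : (c == '0') <;> cases hall : rest.all PySem.Chars.isdigit <;>
        simp [pvAltLoop, h, h0, hall, pvAltLoop_true]
    · -- head is not a digit: both sides reduce to the tail at seen = false
      rw [show pvFindDigit (c :: rest) 0 = (pvFindDigit rest 0).map (· + 1) from by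
            rw [show pvFindDigit (c :: rest) 0 = pvFindDigit rest 1 from by
                  simp [pvFindDigit, h],
                pvFindDigit_shift rest 1],
          show pvAltLoop (c :: rest) false = pvAltLoop rest false from by
            simp [pvAltLoop, h],
          ← ih]
      cases pvFindDigit rest 0 with
      | none => rfl
      | some st =>
        simp only [Option.map_some]
        rw [pvSuffixLoop_range (c :: rest) (st + 1), pvSuffixLoop_range rest st,
            show PySem.List.pyGetD (c :: rest) ((st + 1 : Nat) : Int) ' '
                = PySem.List.pyGetD rest ((st : Nat) : Int) ' ' from by
              rw [PySem.List.pyGetD_natCast, PySem.List.pyGetD_natCast]; rfl]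
        rfl

-- ===== VERDICT (by name: the statement is the Claim_ definition above) =====
theorem check_number_placement_spec : Claim_equal_check_number_placement := by
  intro s _hD
  unfold Spec_check_number_placement check_number_placement check_number_placement_alt
  exact pvMain s.toList
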